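-- pv_equiv track=rewrite | github.com/Somanikaushik43/realestate-chatbot | backend/analysis/views.py | detect_price_col
-- ===== SOURCE A (Python) =====
-- def detect_price_col(columns):
--     patterns = [
--         "flat___weighted_average_rate",
--         "flat__weighted_average_rate",
--         "flat_weighted_average_rate",
--         "flatweightedaveragerate",
--         "weighted_average_rate",
--         "flat_avg_rate",
--         "avg_price",
--         "avgprice",
--         "price",
--         "rate",
--     ]
--
--     for c in columns:
--         name = c.replace("__", "_")
--         if "flat" in name and "average" in name and "rate" in name:
--             return c
--
--     for p in patterns:
--         for c in columns:
--             if p == c: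
--                 return c
--
--     for c in columns:
--         if "rate" in c:
--             return c
--
--     return None
-- ===== SOURCE B (Python) =====
-- def detect_price_col(columns):
--     patterns = [
--         "flat___weighted_average_rate",
--         "flat__weighted_average_rate",
--         "flat_weighted_average_rate",
--         "flatweightedaveragerate",
--         "weighted_average_rate",
--         "flat_avg_rate",
--         "avg_price",
--         "avgprice",
--         "price",
--         "rate",
--     ]
--     pat_idx = {p: i for i, p in enumerate(patterns)}
--
--     best = None  # (key, column); key = (tier, pattern_index, position)
--     for pos, c in enumerate(columns):
--         name = c.replace("__", "_")
--         if "flat" in name and "average" in name and "rate" in name: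
--             key = (0, 0, pos)
--         elif c in pat_idx:
--             key = (1, pat_idx[c], pos)
--         elif "rate" in c:
--             key = (2, 0, pos)
--         else:
--             continue
--         if best is None or key < best[0]:
--             best = (key, c)
--     return None if best is None else best[1]
-- ===== Notes on version B (the rewrite author's own statement) =====
-- stated objective: alternative
-- what changed: A's three separate scans (normalized flat/average/rate scan, then a pattern-by-pattern exact-match scan, then a 'rate'-substring scan) are replaced by a single pass over the columns that assigns each eligible column a (tier, pattern-index, position) key via a precomputed pattern->index dict and returns the column with the lexicographically minimal key.
import Mathlib
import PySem

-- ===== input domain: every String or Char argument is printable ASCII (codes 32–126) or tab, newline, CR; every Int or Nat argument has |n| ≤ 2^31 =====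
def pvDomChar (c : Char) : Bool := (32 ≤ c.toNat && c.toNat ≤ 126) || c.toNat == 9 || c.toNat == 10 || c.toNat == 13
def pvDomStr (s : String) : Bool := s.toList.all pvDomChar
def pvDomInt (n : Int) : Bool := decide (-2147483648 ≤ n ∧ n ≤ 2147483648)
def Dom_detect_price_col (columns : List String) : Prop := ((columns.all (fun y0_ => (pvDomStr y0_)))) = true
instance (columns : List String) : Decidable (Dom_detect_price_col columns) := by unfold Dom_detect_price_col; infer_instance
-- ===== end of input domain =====

-- B replaces A's three separate scans over the columns by one single pass that
-- ranks every column with a (tier, pattern-index, position) key and keeps the minimum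
-- (objective: alternative decomposition, same result).

def pvPatterns : List String := [
  "flat___weighted_average_rate",
  "flat__weighted_average_rate",
  "flat_weighted_average_rate",
  "flatweightedaveragerate",
  "weighted_average_rate",
  "flat_avg_rate",
  "avg_price",
  "avgprice",
  "price",
  "rate"]

-- shared helper: the first loop's test ('flat'/'average'/'rate' all in c.replace("__","_"))
def pvCond0 (c : String) : Bool :=
  let name := PySem.Str.replace c "__" "_"
  PySem.Str.isIn "flat" name && PySem.Str.isIn "average" name && PySem.Str.isIn "rate" name

-- ===== PORT A =====
def detect_price_col (columns : List String) : Option String :=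
  match List.find? (fun c => pvCond0 c) columns with
  | some c => some c
  | none =>
    match List.findSome? (fun p => List.find? (fun c => p == c) columns) pvPatterns with
    | some c => some c
    | none => List.find? (fun c => PySem.Str.isIn "rate" c) columns

-- ===== PORT B =====
-- pat_idx = {p: i for i, p in enumerate(patterns)}
def pvPatIdx : PySem.Dict String Int :=
  PySem.Dict.ofList ((PySem.List.enumerate pvPatterns).map (fun ip => (ip.2, ip.1)))

-- the key computed for one column (None = 'continue')
def pvKey? (pos : Int) (c : String) : Option (Int × Int × Int) :=
  if pvCond0 c then some (0, 0, pos)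
  else
    match pvPatIdx.get? c with
    | some i => some (1, i, pos)
    | none => if PySem.Str.isIn "rate" c then some (2, 0, pos) else none

-- Python tuple comparison 'key < best[0]' (lexicographic on the triple)
def pvKeyLt (a b : Int × Int × Int) : Bool :=
  a.1 < b.1 || (a.1 == b.1 && (a.2.1 < b.2.1 || (a.2.1 == b.2.1 && a.2.2 < b.2.2)))

-- 'if best is None or key < best[0]: best = (key, c)'
def pvMerge (best : Option ((Int × Int × Int) × String)) (e : (Int × Int × Int) × String) :
    Option ((Int × Int × Int) × String) :=
  match best with
  | none => some e
  | some b => if pvKeyLt e.1 b.1 then some e else some b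

-- 'for pos, c in enumerate(columns): …'
def pvGo (pos : Int) (best : Option ((Int × Int × Int) × String)) :
    List String → Option ((Int × Int × Int) × String)
  | [] => best
  | c :: cs =>
    pvGo (pos + 1)
      (match pvKey? pos c with
       | none => best
       | some k => pvMerge best (k, c)) cs

def detect_price_col_alt (columns : List String) : Option String :=
  (pvGo 0 none columns).map (fun b => b.2)

-- ===== PRECONDITION & SPEC =====
def Spec_detect_price_col (columns : List String) (out : Option String) : Prop := out = detect_price_col_alt columns
instance (columns : List String) (out : Option String) : Decidable (Spec_detect_price_col columns out) := by unfold Spec_detect_price_col; infer_instance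

-- ===== CLAIM (what is proved, stated in full; the proofs are below) =====
def Claim_equal_detect_price_col : Prop := ∀ (columns : List String), Dom_detect_price_col columns → Spec_detect_price_col columns (detect_price_col columns)

-- ===== LEMMAS AND PROOFS =====

-- the keyed entries the single pass effectively folds over
def pvEnt (pos : Int) : List String → List ((Int × Int × Int) × String)
  | [] => []
  | c :: cs =>
    match pvKey? pos c with
    | none => pvEnt (pos + 1) cs
    | some k => (k, c) :: pvEnt (pos + 1) cs

theorem pvGo_eq_foldl (l : List String) : ∀ (pos : Int) best,
    pvGo pos best l = (pvEnt pos l).foldl pvMerge best := by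
  induction l with
  | nil => intro pos best; rfl
  | cons c cs ih =>
    intro pos best
    simp only [pvGo, pvEnt]
    cases h : pvKey? pos c with
    | none => simp [ih]
    | some k => simp [ih]

theorem pvEnt_append (l1 l2 : List String) : ∀ (p : Int),
    pvEnt p (l1 ++ l2) = pvEnt p l1 ++ pvEnt (p + l1.length) l2 := by
  induction l1 with
  | nil => intro p; simp [pvEnt]
  | cons c cs ih =>
    intro p
    simp only [List.cons_append, pvEnt]
    have harith : p + 1 + (cs.length : Int) = p + ((c :: cs).length : Int) := by
      push_cast [List.length_cons]; ring
    cases h : pvKey? p c with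
    | none => simp only [ih, harith]
    | some k => simp only [ih, harith, List.cons_append]

theorem pvEnt_mem (l : List String) : ∀ (p : Int) e, e ∈ pvEnt p l →
    e.2 ∈ l ∧ ∃ q, p ≤ q ∧ pvKey? q e.2 = some e.1 := by
  induction l with
  | nil => intro p e h; simp [pvEnt] at h
  | cons c cs ih =>
    intro p e h
    simp only [pvEnt] at h
    cases hk : pvKey? p c with
    | none =>
      rw [hk] at h
      rcases ih (p + 1) e h with ⟨h1, q, hq, hkey⟩
      exact ⟨List.mem_cons_of_mem _ h1, q, by omega, hkey⟩
    | some k =>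
      rw [hk] at h
      rcases List.mem_cons.mp h with h | h
      · subst h; exact ⟨List.mem_cons_self, p, le_refl _, hk⟩
      · rcases ih (p + 1) e h with ⟨h1, q, hq, hkey⟩
        exact ⟨List.mem_cons_of_mem _ h1, q, by omega, hkey⟩

theorem pvEnt_nil (l : List String) : ∀ (p : Int),
    (∀ x ∈ l, ∀ q : Int, pvKey? q x = none) → pvEnt p l = [] := by
  induction l with
  | nil => intro p _; rfl
  | cons c cs ih =>
    intro p h
    simp only [pvEnt, h c List.mem_cons_self p]
    exact ih (p + 1) (fun x hx q => h x (List.mem_cons_of_mem _ hx) q)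

theorem pvFoldl_stay (E : List ((Int × Int × Int) × String)) : ∀ b,
    (∀ e ∈ E, pvKeyLt e.1 b.1 = false) → E.foldl pvMerge (some b) = some b := by
  induction E with
  | nil => intro b _; rfl
  | cons e E ih =>
    intro b h
    simp only [List.foldl_cons, pvMerge, h e List.mem_cons_self]
    exact ih b (fun x hx => h x (List.mem_cons_of_mem _ hx))

theorem pvFoldl_opt (E : List ((Int × Int × Int) × String)) : ∀ b?,
    E.foldl pvMerge b? = b? ∨ ∃ e ∈ E, E.foldl pvMerge b? = some e := by
  induction E with
  | nil => intro b?; left; rfl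
  | cons e E ih =>
    intro b?
    simp only [List.foldl_cons]
    rcases ih (pvMerge b? e) with h | ⟨x, hx, h⟩
    · rw [h]
      cases b? with
      | none => exact Or.inr ⟨e, List.mem_cons_self, rfl⟩
      | some b =>
        simp only [pvMerge]
        split
        · exact Or.inr ⟨e, List.mem_cons_self, rfl⟩
        · exact Or.inl rfl
    · exact Or.inr ⟨x, List.mem_cons_of_mem _ hx, h⟩

theorem pvFoldl_win (E1 E2 : List ((Int × Int × Int) × String)) (k : Int × Int × Int) (c : String)
    (h1 : ∀ x ∈ E1, pvKeyLt k x.1 = true) (h2 : ∀ y ∈ E2, pvKeyLt y.1 k = false) :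
    (E1 ++ (k, c) :: E2).foldl pvMerge none = some (k, c) := by
  rw [List.foldl_append]
  rcases pvFoldl_opt E1 none with h | ⟨x, hx, h⟩
  · rw [h]
    simp only [List.foldl_cons, pvMerge]
    exact pvFoldl_stay E2 (k, c) h2
  · rw [h]
    simp only [List.foldl_cons, pvMerge, h1 x hx]
    exact pvFoldl_stay E2 (k, c) h2

-- inversion of pvKey?
theorem pvKey?_inv {q : Int} {c : String} {k : Int × Int × Int} (h : pvKey? q c = some k) :
    (k = (0, 0, q) ∧ pvCond0 c = true) ∨
    (∃ i, pvPatIdx.get? c = some i ∧ k = (1, i, q) ∧ pvCond0 c = false) ∨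
    (k = (2, 0, q) ∧ pvCond0 c = false ∧ pvPatIdx.get? c = none ∧ PySem.Str.isIn "rate" c = true) := by
  unfold pvKey? at h
  by_cases hc : pvCond0 c = true
  · rw [if_pos hc] at h
    exact Or.inl ⟨(Option.some.inj h).symm, hc⟩
  · rw [if_neg hc] at h
    simp only [Bool.not_eq_true] at hc
    cases hp : pvPatIdx.get? c with
    | some i =>
      rw [hp] at h
      exact Or.inr (Or.inl ⟨i, rfl, (Option.some.inj h).symm, hc⟩)
    | none =>
      rw [hp] at h
      by_cases hr : PySem.Str.isIn "rate" c = true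
      · rw [if_pos hr] at h
        exact Or.inr (Or.inr ⟨(Option.some.inj h).symm, hc, rfl, hr⟩)
      · rw [if_neg hr] at h; exact absurd h (by simp)

-- pat_idx on the patterns themselves
theorem pvPatIdx_at (j : Nat) (h : j < 10) :
    pvPatIdx.get? (pvPatterns.getD j "") = some (j : Int) := by
  interval_cases j <;> decide

-- the underlying association list of pat_idx
theorem pvItems : pvPatIdx.items = [("flat___weighted_average_rate", (0 : Int)), ("flat__weighted_average_rate", (1 : Int)), ("flat_weighted_average_rate", (2 : Int)), ("flatweightedaveragerate", (3 : Int)), ("weighted_average_rate", (4 : Int)), ("flat_avg_rate", (5 : Int)), ("avg_price", (6 : Int)), ("avgprice", (7 : Int)), ("price", (8 : Int)), ("rate", (9 : Int))] := by decide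

theorem pvFindPairs {c : String} {i : Int} : ∀ (ps : List (String × Int)),
    Option.map (fun x => x.2) (List.find? (fun p => p.1 == c) ps) = some i →
    ∃ p ∈ ps, p.1 = c ∧ p.2 = i := by
  intro ps
  induction ps with
  | nil => intro h; simp at h
  | cons p ps ih =>
    intro h
    rw [List.find?_cons] at h
    cases hb : (p.1 == c) with
    | true =>
      rw [hb] at h
      simp only [Option.map_some, Option.some.injEq] at h
      exact ⟨p, List.mem_cons_self, eq_of_beq hb, h⟩
    | false =>
      rw [hb] at h
      obtain ⟨q, hq, hqc, hqi⟩ := ih h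
      exact ⟨q, List.mem_cons_of_mem _ hq, hqc, hqi⟩

-- inversion of pat_idx lookups
theorem pvPatIdx_inv {c : String} {i : Int} (h : pvPatIdx.get? c = some i) :
    ∃ j : Nat, j < 10 ∧ i = (j : Int) ∧ c = pvPatterns.getD j "" := by
  simp only [PySem.Dict.get?] at h
  rw [pvItems] at h
  obtain ⟨p, hp, hc, hi⟩ := pvFindPairs _ h
  fin_cases hp <;>
    first
      | exact ⟨0, by omega, by omega, hc.symm⟩
      | exact ⟨1, by omega, by omega, hc.symm⟩
      | exact ⟨2, by omega, by omega, hc.symm⟩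
      | exact ⟨3, by omega, by omega, hc.symm⟩
      | exact ⟨4, by omega, by omega, hc.symm⟩
      | exact ⟨5, by omega, by omega, hc.symm⟩
      | exact ⟨6, by omega, by omega, hc.symm⟩
      | exact ⟨7, by omega, by omega, hc.symm⟩
      | exact ⟨8, by omega, by omega, hc.symm⟩
      | exact ⟨9, by omega, by omega, hc.symm⟩

-- findSome? split
theorem pvFindSome?_split {α β : Type} (f : α → Option β) (l : List α) (b : β)
    (h : List.findSome? f l = some b) :
    ∃ l1 a l2, l = l1 ++ a :: l2 ∧ f a = some b ∧ ∀ x ∈ l1, f x = none := by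
  induction l with
  | nil => simp at h
  | cons a l ih =>
    rw [List.findSome?_cons] at h
    cases hf : f a with
    | some v =>
      rw [hf] at h
      exact ⟨[], a, l, by simp, by rw [hf]; simpa using h, by simp⟩
    | none =>
      rw [hf] at h
      rcases ih h with ⟨l1, a', l2, rfl, hfa, hnone⟩
      exact ⟨a :: l1, a', l2, rfl, hfa, by
        intro x hx
        rcases List.mem_cons.mp hx with rfl | hx
        · exact hf
        · exact hnone x hx⟩

theorem pvMain (columns : List String) : detect_price_col columns = detect_price_col_alt columns := by
  unfold detect_price_col detect_price_col_alt
  rw [pvGo_eq_foldl]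
  cases h0 : List.find? (fun c => pvCond0 c) columns with
  | some c =>
    simp only
    rw [List.find?_eq_some_iff_append] at h0
    obtain ⟨hc0, l1, l2, rfl, hl1⟩ := h0
    rw [pvEnt_append]
    simp only [zero_add]
    have hkey : pvKey? (l1.length : Int) c = some (0, 0, (l1.length : Int)) := by
      simp [pvKey?, hc0]
    have hcons : pvEnt (l1.length : Int) (c :: l2) =
        ((0, 0, (l1.length : Int)), c) :: pvEnt ((l1.length : Int) + 1) l2 := by
      simp only [pvEnt, hkey]
    rw [hcons, pvFoldl_win]
    · rfl
    · intro x hx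
      obtain ⟨hx2, q, hq, hk⟩ := pvEnt_mem _ _ _ hx
      rcases pvKey?_inv hk with ⟨hke, hcc⟩ | ⟨i, hg, hke, hcc⟩ | ⟨hke, hcc, hg, hr⟩
      · have := hl1 _ hx2; rw [hcc] at this; simp at this
      · rw [hke]; simp [pvKeyLt]
      · rw [hke]; simp [pvKeyLt]
    · intro y hy
      obtain ⟨hy2, q, hq, hk⟩ := pvEnt_mem _ _ _ hy
      rcases pvKey?_inv hk with ⟨hke, hcc⟩ | ⟨i, hg, hke, hcc⟩ | ⟨hke, hcc, hg, hr⟩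
      · rw [hke]; simp [pvKeyLt]; omega
      · rw [hke]; simp [pvKeyLt]
      · rw [hke]; simp [pvKeyLt]
  | none =>
    simp only
    have hnc : ∀ x ∈ columns, pvCond0 x = false := by
      intro x hx
      have := List.find?_eq_none.mp h0 x hx
      simpa using this
    cases h1 : List.findSome? (fun p => List.find? (fun c => p == c) columns) pvPatterns with
    | some c =>
      simp only
      obtain ⟨P1, p, P2, hps, hfp, hP1⟩ := pvFindSome?_split _ _ _ h1
      rw [List.find?_eq_some_iff_append] at hfp
      obtain ⟨hpc, m1, m2, hcols, hm1⟩ := hfp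
      have hcp : p = c := eq_of_beq hpc
      subst hcp
      subst hcols
      have hn : P1.length < 10 := by
        have := congrArg List.length hps
        simp [pvPatterns] at this
        omega
      have hpat : pvPatterns.getD P1.length "" = p := by
        rw [hps, List.getD_eq_getElem?_getD, List.getElem?_append_right (Nat.le_refl _)]
        simp
      have hgetp : pvPatIdx.get? p = some ((P1.length : Nat) : Int) := by
        rw [← hpat]; exact pvPatIdx_at _ hn
      have hge : ∀ x ∈ (m1 ++ p :: m2), ∀ i : Int, pvPatIdx.get? x = some i →
          ((P1.length : Nat) : Int) ≤ i := by
        intro x hx i hg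
        obtain ⟨j, hj10, rfl, hxj⟩ := pvPatIdx_inv hg
        by_contra hlt
        have hjlt : j < P1.length := by omega
        have hxP1 : x ∈ P1 := by
          rw [hxj, hps, List.getD_eq_getElem?_getD, List.getElem?_append_left hjlt]
          simp [hjlt]
        have hfind := hP1 x hxP1
        have := List.find?_eq_none.mp hfind x hx
        simp at this
      have hne_p : ∀ x ∈ (m1 ++ p :: m2), pvPatIdx.get? x = some ((P1.length : Nat) : Int) →
          x = p := by
        intro x _ hg
        obtain ⟨j, hj10, hji, hxj⟩ := pvPatIdx_inv hg
        have : j = P1.length := by omega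
        rw [hxj, this, hpat]
      have hncp : pvCond0 p = false := hnc p (by simp)
      have hkey : pvKey? (m1.length : Int) p =
          some (1, ((P1.length : Nat) : Int), (m1.length : Int)) := by
        simp [pvKey?, hncp, hgetp]
      rw [pvEnt_append]
      simp only [zero_add]
      have hcons : pvEnt (m1.length : Int) (p :: m2) =
          ((1, ((P1.length : Nat) : Int), (m1.length : Int)), p) ::
            pvEnt ((m1.length : Int) + 1) m2 := by
        simp only [pvEnt, hkey]
      rw [hcons, pvFoldl_win]
      · rfl
      · intro x hx
        obtain ⟨hx2, q, hq, hk⟩ := pvEnt_mem _ _ _ hx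
        have hxcols : x.2 ∈ m1 ++ p :: m2 := List.mem_append_left _ hx2
        rcases pvKey?_inv hk with ⟨hke, hcc⟩ | ⟨i, hg, hke, hcc⟩ | ⟨hke, hcc, hg, hr⟩
        · rw [hnc _ hxcols] at hcc; simp at hcc
        · have hile := hge _ hxcols _ hg
          have hine : i ≠ ((P1.length : Nat) : Int) := by
            intro hie
            have hxp := hne_p _ hxcols (hie ▸ hg)
            have hm := hm1 _ hx2
            rw [hxp] at hm
            simp at hm
          rw [hke]; simp [pvKeyLt]; omega
        · rw [hke]; simp [pvKeyLt]
      · intro y hy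
        obtain ⟨hy2, q, hq, hk⟩ := pvEnt_mem _ _ _ hy
        have hycols : y.2 ∈ m1 ++ p :: m2 := by
          simp only [List.mem_append, List.mem_cons]
          right; right; exact hy2
        rcases pvKey?_inv hk with ⟨hke, hcc⟩ | ⟨i, hg, hke, hcc⟩ | ⟨hke, hcc, hg, hr⟩
        · rw [hnc _ hycols] at hcc; simp at hcc
        · have hile := hge _ hycols _ hg
          rw [hke]; simp [pvKeyLt]; omega
        · rw [hke]; simp [pvKeyLt]
    | none =>
      simp only
      have hget_none : ∀ x ∈ columns, pvPatIdx.get? x = none := by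
        intro x hx
        cases hg : pvPatIdx.get? x with
        | none => rfl
        | some i =>
          obtain ⟨j, hj10, rfl, hxj⟩ := pvPatIdx_inv hg
          have hjlen : j < pvPatterns.length := by simp [pvPatterns]; omega
          have hxmem : x ∈ pvPatterns := by
            rw [hxj, List.getD_eq_getElem pvPatterns "" hjlen]
            exact List.getElem_mem hjlen
          have hfind := List.findSome?_eq_none_iff.mp h1 x hxmem
          have := List.find?_eq_none.mp hfind x hx
          simp at this
      cases h2 : List.find? (fun c => PySem.Str.isIn "rate" c) columns with
      | some c =>
        rw [List.find?_eq_some_iff_append] at h2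
        obtain ⟨hrc, l1, l2, rfl, hl1⟩ := h2
        have hnil : pvEnt 0 l1 = [] := by
          apply pvEnt_nil
          intro x hx q
          have hxcols : x ∈ l1 ++ c :: l2 := List.mem_append_left _ hx
          have hr : PySem.Chars.isIn ['r', 'a', 't', 'e'] x.toList = false := by
            simpa using hl1 _ hx
          simp [pvKey?, hnc _ hxcols, hget_none _ hxcols, hr]
        have hcc : pvCond0 c = false := hnc c (by simp)
        have hgc : pvPatIdx.get? c = none := hget_none c (by simp)
        have hrc' : PySem.Chars.isIn ['r', 'a', 't', 'e'] c.toList = true := by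
          simpa using hrc
        have hkey : pvKey? (l1.length : Int) c = some (2, 0, (l1.length : Int)) := by
          simp [pvKey?, hcc, hgc, hrc']
        rw [pvEnt_append]
        simp only [zero_add]
        have hcons : pvEnt (l1.length : Int) (c :: l2) =
            ((2, 0, (l1.length : Int)), c) :: pvEnt ((l1.length : Int) + 1) l2 := by
          simp only [pvEnt, hkey]
        rw [hcons, pvFoldl_win]
        · rfl
        · intro x hx
          rw [hnil] at hx
          simp at hx
        · intro y hy
          obtain ⟨hy2, q, hq, hk⟩ := pvEnt_mem _ _ _ hy
          have hycols : y.2 ∈ l1 ++ c :: l2 := by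
            simp only [List.mem_append, List.mem_cons]
            right; right; exact hy2
          rcases pvKey?_inv hk with ⟨hke, hcc'⟩ | ⟨i, hg, hke, hcc'⟩ | ⟨hke, hcc', hg, hr⟩
          · rw [hnc _ hycols] at hcc'; simp at hcc'
          · rw [hget_none _ hycols] at hg; simp at hg
          · rw [hke]; simp [pvKeyLt]; omega
      | none =>
        have hnil : pvEnt 0 columns = [] := by
          apply pvEnt_nil
          intro x hx q
          have hr : PySem.Chars.isIn ['r', 'a', 't', 'e'] x.toList = false := by
            simpa using List.find?_eq_none.mp h2 x hx
          simp [pvKey?, hnc _ hx, hget_none _ hx, hr]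
        rw [hnil]
        rfl

-- ===== VERDICT (by name: the statement is the Claim_ definition above) =====
theorem detect_price_col_spec : Claim_equal_detect_price_col := by
  intro columns _
  unfold Spec_detect_price_col
  exact pvMain columns
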